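-- pv_equiv track=rewrite | github.com/plocher/jBOM | src/jbom/cli/audit.py | _get_context_value
-- ===== SOURCE A (Python) =====
-- _PROJECT_MISSING_VALUE = "MISSING"
--
-- def _get_context_value(
--     context: dict[str, str],
--     field_names: tuple[str, ...] | list[str],
-- ) -> str:
--     """Return the first meaningful context value for any of the provided aliases."""
--     normalized_context: dict[str, str] = {
--         str(key or "").strip().lower(): str(value or "").strip()
--         for key, value in context.items()
--     }
--     for field_name in field_names:
--         normalized_name = field_name.strip().lower()
--         if not normalized_name:
--             continue
--         value = normalized_context.get(normalized_name, "")
--         if _is_meaningful_match_value(value):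
--             return value
--     return ""
--
-- def _is_meaningful_match_value(value: str) -> bool:
--     """Return True when a value is useful as a matching clue."""
--     normalized = str(value or "").strip()
--     if not normalized:
--         return False
--     return normalized.upper() not in {"~", _PROJECT_MISSING_VALUE}
-- ===== SOURCE B (Python) =====
-- _PROJECT_MISSING_VALUE = "MISSING"
--
-- def _get_context_value(context, field_names):
--     """Inverted traversal: one pass over the context fills a per-field candidate
--     slot (last normalized-key match wins), then the first meaningful slot is
--     selected in field order."""
--     names = [f.strip().lower() for f in field_names]
--     candidates = [None] * len(names)
--     for key, value in context.items():
--         nk = str(key or "").strip().lower()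
--         for i, name in enumerate(names):
--             if name and name == nk:
--                 candidates[i] = str(value or "").strip()
--     for cand in candidates:
--         if cand is not None and _is_meaningful_match_value(cand):
--             return cand
--     return ""
--
-- def _is_meaningful_match_value(value):
--     normalized = str(value or "").strip()
--     if not normalized:
--         return False
--     return normalized.upper() not in {"~", _PROJECT_MISSING_VALUE}
-- ===== Notes on version B (the rewrite author's own statement) =====
-- stated objective: alternative
-- what changed: B inverts the traversal: instead of A's precomputed normalized dict queried per field, B makes one pass over the context filling a per-field candidate array (last normalized-key match wins) and then selects the first meaningful candidate in field order.
import Mathlib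
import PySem

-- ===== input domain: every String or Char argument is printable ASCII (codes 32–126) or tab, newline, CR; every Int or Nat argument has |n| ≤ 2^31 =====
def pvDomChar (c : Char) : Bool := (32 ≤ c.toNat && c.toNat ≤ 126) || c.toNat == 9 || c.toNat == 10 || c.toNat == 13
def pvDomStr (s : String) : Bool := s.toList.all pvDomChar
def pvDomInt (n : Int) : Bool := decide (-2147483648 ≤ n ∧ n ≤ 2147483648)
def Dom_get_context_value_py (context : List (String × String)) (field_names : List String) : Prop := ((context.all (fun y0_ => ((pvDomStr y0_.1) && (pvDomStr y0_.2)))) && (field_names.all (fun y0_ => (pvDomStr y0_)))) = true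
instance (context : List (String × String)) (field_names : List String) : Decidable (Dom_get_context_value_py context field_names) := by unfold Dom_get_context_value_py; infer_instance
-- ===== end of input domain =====

-- B inverts the traversal: one pass over the context fills a per-field candidate array
-- (last normalized-key match wins), then the first meaningful candidate is selected ('alternative').

-- shared normalization helper: str(x or "").strip().lower() on a string argument
def pv_norm (s : String) : String := PySem.Str.lower (PySem.Str.strip s)

def pv_meaningful (value : String) : Bool :=
  let normalized := PySem.Str.strip value
  if normalized = "" then false
  else !(PySem.Str.upper normalized == "~" || PySem.Str.upper normalized == "MISSING")

-- ===== PORT A =====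
-- A's per-field loop over a prebuilt normalized dict (str(key or "") is identity on strings)
def pvLoopA (nc : PySem.Dict String String) : List String → String
  | [] => ""
  | f :: rest =>
    let n := pv_norm f
    if n = "" then pvLoopA nc rest
    else
      let value := nc.getD n ""
      if pv_meaningful value then value else pvLoopA nc rest

def get_context_value_py (context : List (String × String)) (field_names : List String) : String :=
  let nc := context.foldl
    (fun d kv => d.insert (pv_norm kv.1) (PySem.Str.strip kv.2))
    PySem.Dict.empty
  pvLoopA nc field_names

-- ===== PORT B =====
-- inner 'for i, name in enumerate(names): if name and name == nk: candidates[i] = v'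
def pvUpdate (names : List String) (cands : List (Option String)) (nk v : String) : List (Option String) :=
  (names.zip cands).map (fun p => if p.1 ≠ "" ∧ p.1 = nk then some v else p.2)

-- 'for cand in candidates: if cand is not None and _is_meaningful_match_value(cand): return cand'
def pvSelect : List (Option String) → String
  | [] => ""
  | none :: r => pvSelect r
  | some c :: r => if pv_meaningful c then c else pvSelect r

def get_context_value_py_alt (context : List (String × String)) (field_names : List String) : String :=
  let names := field_names.map pv_norm
  let cands := context.foldl
    (fun cs kv => pvUpdate names cs (pv_norm kv.1) (PySem.Str.strip kv.2))
    (List.replicate names.length none)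
  pvSelect cands

-- ===== PRECONDITION & SPEC =====
def Spec_get_context_value_py (context : List (String × String)) (field_names : List String) (out : String) : Prop := out = get_context_value_py_alt context field_names
instance (context : List (String × String)) (field_names : List String) (out : String) : Decidable (Spec_get_context_value_py context field_names out) := by unfold Spec_get_context_value_py; infer_instance

-- ===== CLAIM (what is proved, stated in full; the proofs are below) =====
def Claim_equal_get_context_value_py : Prop := ∀ (context : List (String × String)) (field_names : List String), Dom_get_context_value_py context field_names → Spec_get_context_value_py context field_names (get_context_value_py context field_names)

-- ===== LEMMAS AND PROOFS =====

-- the dict lookup after A's build-fold is a last-wins scan of the context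
theorem pv_get_foldl (context : List (String × String)) (d : PySem.Dict String String) (q : String) :
    (context.foldl
      (fun d kv => d.insert (pv_norm kv.1) (PySem.Str.strip kv.2)) d).get? q
    = context.foldl
      (fun acc kv => if pv_norm kv.1 = q then some (PySem.Str.strip kv.2) else acc)
      (d.get? q) := by
  induction context generalizing d with
  | nil => rfl
  | cons kv rest ih =>
    rw [List.foldl_cons, ih, PySem.Dict.get?_insert, List.foldl_cons]
    rcases eq_or_ne q (pv_norm kv.1) with h | h
    · simp [h]
    · simp [h, h.symm]

theorem pv_zipWith_id {α β : Type} (l : List α) :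
    ∀ l' : List β, l'.length ≤ l.length → List.zipWith (fun _ b => b) l l' = l' := by
  induction l with
  | nil => intro l' h; cases l' with | nil => rfl | cons => simp at h
  | cons a r ih => intro l' h; cases l' with | nil => rfl | cons b r' => simp [ih r' (by simpa using h)]

theorem pvUpdate_zipWith (names : List String) :
    ∀ (cands : List (Option String)) (nk v : String),
    pvUpdate names cands nk v
      = List.zipWith (fun n c => if n ≠ "" ∧ n = nk then some v else c) names cands := by
  induction names with
  | nil => intro cands nk v; rfl
  | cons n ns ih =>
    intro cands nk v
    cases cands with
    | nil => rfl
    | cons c cs => simp [pvUpdate, List.zip_cons_cons] at ih ⊢; exact ih cs nk v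

theorem pv_zipWith_zipWith {α β γ δ : Type} (f : α → β → γ) (g : α → δ → β) (l : List α) :
    ∀ l' : List δ, List.zipWith f l (List.zipWith g l l')
      = List.zipWith (fun a b => f a (g a b)) l l' := by
  induction l with
  | nil => intro l'; rfl
  | cons a r ih => intro l'; cases l' with | nil => rfl | cons b r' => simp [ih r']

-- B's context fold acts independently on each candidate slot
theorem pv_fold_update (context : List (String × String)) (names : List String) :
    ∀ (cands : List (Option String)), cands.length ≤ names.length →
    context.foldl
      (fun cs kv => pvUpdate names cs (pv_norm kv.1) (PySem.Str.strip kv.2)) cands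
    = List.zipWith (fun n c => context.foldl
        (fun acc kv => if n ≠ "" ∧ n = pv_norm kv.1 then some (PySem.Str.strip kv.2) else acc) c)
        names cands := by
  induction context with
  | nil => intro cands h; exact (pv_zipWith_id names cands h).symm
  | cons kv rest ih =>
    intro cands h
    rw [List.foldl_cons, ih _ (by simp [pvUpdate_zipWith]),
      pvUpdate_zipWith, pv_zipWith_zipWith]
    rfl

theorem pv_zipWith_replicate {α β γ : Type} (f : α → β → γ) (c : β) (l : List α) :
    List.zipWith f l (List.replicate l.length c) = l.map (fun a => f a c) := by
  induction l with
  | nil => rfl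
  | cons a r ih => simp [List.replicate_succ, ih]

-- a slot with an empty name is never filled
theorem pv_slot_empty (context : List (String × String)) :
    context.foldl
      (fun acc kv => if ("" : String) ≠ "" ∧ ("" : String) = pv_norm kv.1 then some (PySem.Str.strip kv.2) else acc)
      (none : Option String) = none := by
  induction context with
  | nil => rfl
  | cons kv rest ih => simp only [List.foldl_cons, ne_eq, not_true_eq_false, false_and, if_false]; exact ih

-- a slot with a nonempty name performs exactly the last-wins scan
theorem pv_slot_ne (context : List (String × String)) (n : String) (hn : n ≠ "") :
    ∀ acc : Option String,
    context.foldl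
      (fun acc kv => if n ≠ "" ∧ n = pv_norm kv.1 then some (PySem.Str.strip kv.2) else acc) acc
    = context.foldl
      (fun acc kv => if pv_norm kv.1 = n then some (PySem.Str.strip kv.2) else acc) acc := by
  induction context with
  | nil => intro acc; simp only [List.foldl_nil]
  | cons kv rest ih =>
    intro acc
    have he : (if n ≠ "" ∧ n = pv_norm kv.1 then some (PySem.Str.strip kv.2) else acc)
        = (if pv_norm kv.1 = n then some (PySem.Str.strip kv.2) else acc) := by
      by_cases h : pv_norm kv.1 = n
      · rw [if_pos h, if_pos ⟨hn, h.symm⟩]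
      · rw [if_neg h, if_neg (fun hc => h hc.2.symm)]
    rw [List.foldl_cons, List.foldl_cons, he, ih]

theorem pv_meaningful_empty : pv_meaningful "" = false := by decide

theorem pv_main (context : List (String × String)) (field_names : List String) :
    get_context_value_py context field_names = get_context_value_py_alt context field_names := by
  simp only [get_context_value_py, get_context_value_py_alt]
  rw [pv_fold_update context (field_names.map pv_norm) _ (by simp),
    pv_zipWith_replicate, List.map_map]
  induction field_names with
  | nil => rfl
  | cons f rest ih =>
    simp only [List.map_cons, pvLoopA, Function.comp]
    by_cases hn : pv_norm f = ""
    · rw [hn]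
      rw [if_pos rfl]
      simp only [pv_slot_empty, pvSelect]
      simpa [hn] using ih
    · rw [if_neg hn, pv_slot_ne context (pv_norm f) hn,
        PySem.Dict.getD_eq_get?_getD, pv_get_foldl,
        show (PySem.Dict.empty : PySem.Dict String String).get? (pv_norm f) = none from rfl]
      cases hscan : context.foldl
          (fun acc kv => if pv_norm kv.1 = pv_norm f then some (PySem.Str.strip kv.2) else acc)
          (none : Option String) with
      | none =>
        simp only [Option.getD_none, pv_meaningful_empty, Bool.false_eq_true, if_false, pvSelect]
        exact ih
      | some c =>
        simp only [Option.getD_some, pvSelect]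
        split
        · rfl
        · exact ih

-- ===== VERDICT (by name: the statement is the Claim_ definition above) =====
theorem get_context_value_py_spec : Claim_equal_get_context_value_py := by
  intro context field_names _
  unfold Spec_get_context_value_py
  exact pv_main context field_names
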